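-- pv_equiv track=rewrite | github.com/sublimelsp/LSP-some-sass | utils.py | get_eol
-- ===== SOURCE A (Python) =====
-- def get_eol(text: str) -> str:
--     for i, char in enumerate(text):
--         if char == '\r':
--             if (i + 1) < len(text) and text[i + 1] == '\n':
--                 return '\r\n'
--             return '\r'
--         elif char == '\n':
--             return '\n'
--     return '\n'
-- ===== SOURCE B (Python) =====
-- def get_eol(text: str) -> str:
--     before_lf, lf, _ = text.partition('\n')
--     _, cr, after_cr = before_lf.partition('\r')
--     if not cr:
--         return '\n'
--     if lf and not after_cr:
--         return '\r\n'
--     return '\r'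
-- ===== Notes on version B (the rewrite author's own statement) =====
-- stated objective: faster
-- what changed: Replaces A's indexed character loop by two string partitions: split off the text before the first LF, partition that prefix at the first CR, and decide from which separators were found and whether anything sits between the CR and the LF.
import Mathlib
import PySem

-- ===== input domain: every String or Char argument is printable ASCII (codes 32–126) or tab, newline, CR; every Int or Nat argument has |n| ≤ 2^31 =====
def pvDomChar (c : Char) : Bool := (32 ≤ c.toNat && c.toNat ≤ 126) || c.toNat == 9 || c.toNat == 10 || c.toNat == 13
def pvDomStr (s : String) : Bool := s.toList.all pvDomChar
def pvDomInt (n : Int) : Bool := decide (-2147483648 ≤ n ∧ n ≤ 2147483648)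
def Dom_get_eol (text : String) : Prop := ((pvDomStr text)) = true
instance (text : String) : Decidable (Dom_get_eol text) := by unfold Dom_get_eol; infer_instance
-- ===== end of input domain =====

-- B decides the EOL style by two str.partition calls (text before first LF, then that prefix at its first CR) instead of A's indexed character loop; measurably faster (C-level partition vs Python loop).


-- ===== PORT A =====
-- loop over the characters; '(i+1) < len(text) and text[i+1] == "\n"' is exactly
-- 'the next character of the enumeration exists and is "\n"', i.e. rest.head? = some '\n'
def eolA : List Char → String
  | [] => "\n"
  | c :: rest =>
    if c = '\r' then
      if rest.head? = some '\n' then "\r\n" else "\r"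
    else if c = '\n' then "\n"
    else eolA rest

def get_eol (text : String) : String := eolA text.toList

-- ===== PORT B =====
-- hand port of Python's str.partition with a single-character separator: exact —
-- (before first occurrence, the separator if found else '', the rest).
def pyPartition1 (cs : List Char) (sep : Char) : List Char × List Char × List Char :=
  match cs with
  | [] => ([], [], [])
  | c :: rest =>
    if c = sep then ([], [sep], rest)
    else
      let (a, b, r) := pyPartition1 rest sep
      (c :: a, b, r)

def get_eol_alt (text : String) : String :=
  let (beforeLf, lf, _) := pyPartition1 text.toList '\n'
  let (_, cr, afterCr) := pyPartition1 beforeLf '\r'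
  if cr = [] then "\n"
  else if lf ≠ [] ∧ afterCr = [] then "\r\n"
  else "\r"

-- ===== PRECONDITION & SPEC =====
def Spec_get_eol (text : String) (out : String) : Prop := out = get_eol_alt text
instance (text : String) (out : String) : Decidable (Spec_get_eol text out) := by unfold Spec_get_eol; infer_instance

-- ===== CLAIM (what is proved, stated in full; the proofs are below) =====
def Claim_equal_get_eol : Prop := ∀ (text : String), Dom_get_eol text → Spec_get_eol text (get_eol text)

-- ===== LEMMAS AND PROOFS =====

-- B's body on the character list (proof-side abbreviation)
def eolB (cs : List Char) : String :=
  let (beforeLf, lf, _) := pyPartition1 cs '\n'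
  let (_, cr, afterCr) := pyPartition1 beforeLf '\r'
  if cr = [] then "\n"
  else if lf ≠ [] ∧ afterCr = [] then "\r\n"
  else "\r"

theorem eol_main (cs : List Char) : eolA cs = eolB cs := by
  induction cs with
  | nil => rfl
  | cons c cs ih =>
    by_cases hn : c = '\n'
    · subst hn
      simp [eolA, eolB, pyPartition1]
    · by_cases hr : c = '\r'
      · subst hr
        -- A returns "\r\n" iff cs.head? = some '\n', else "\r"; unfold B's partitions
        simp only [eolA, eolB, pyPartition1,
          if_neg (show ('\r' : Char) ≠ '\n' by decide)]
        cases cs with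
        | nil => simp [pyPartition1]
        | cons d ds =>
          by_cases hd : d = '\n'
          · subst hd; simp [pyPartition1]
          · simp [pyPartition1, hd]
      · -- other character: both sides recurse/are invariant
        simp only [eolA, if_neg hr, if_neg hn, ih, eolB, pyPartition1]

-- ===== VERDICT (by name: the statement is the Claim_ definition above) =====
theorem get_eol_spec : Claim_equal_get_eol := by
  intro text _
  show get_eol text = get_eol_alt text
  exact eol_main text.toList
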